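-- pv_equiv track=rewrite | github.com/andrewdyates/llvm2 | looper/context/git_context.py | _extract_handoff_block
-- ===== SOURCE A (Python) =====
-- def _extract_handoff_block(commit_body: str) -> str | None:
--     """Extract ## Handoff block content from commit message.
--
--     Returns the content between ## Handoff and the next ## or --- line,
--     or None if no handoff block found.
--     """
--     if "## Handoff" not in commit_body:
--         return None
--
--     lines = commit_body.split("\n")
--     in_handoff = False
--     handoff_lines: list[str] = []
--
--     for line in lines:
--         if line.startswith("## Handoff"):
--             in_handoff = True
--             continue
--         if in_handoff:
--             if line.startswith(("## ", "---")):
--                 break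
--             handoff_lines.append(line)
--
--     return "\n".join(handoff_lines).strip() or None
-- ===== SOURCE B (Python) =====
-- def _extract_handoff_block(commit_body: str) -> str | None:
--     """Extract ## Handoff block content from commit message (stateless two-phase version)."""
--     if "## Handoff" not in commit_body:
--         return None
--
--     lines = commit_body.split("\n")
--     start = next((i for i, line in enumerate(lines) if line.startswith("## Handoff")), None)
--     if start is None:
--         return None
--
--     # Lines of the block: everything after the header, minus any repeated
--     # "## Handoff" headers, up to the first terminator line.
--     rest = [line for line in lines[start + 1:] if not line.startswith("## Handoff")]
--     end = next((i for i, line in enumerate(rest) if line.startswith(("## ", "---"))), len(rest))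
--     return "\n".join(rest[:end]).strip() or None
-- ===== Notes on version B (the rewrite author's own statement) =====
-- stated objective: simpler
-- what changed: Replaced the single stateful loop (in_handoff flag, accumulator, break) by a stateless two-phase decomposition: find the index of the first '## Handoff' header line, then filter/take the following lines up to the first terminator via index search and slicing.
import Mathlib
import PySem

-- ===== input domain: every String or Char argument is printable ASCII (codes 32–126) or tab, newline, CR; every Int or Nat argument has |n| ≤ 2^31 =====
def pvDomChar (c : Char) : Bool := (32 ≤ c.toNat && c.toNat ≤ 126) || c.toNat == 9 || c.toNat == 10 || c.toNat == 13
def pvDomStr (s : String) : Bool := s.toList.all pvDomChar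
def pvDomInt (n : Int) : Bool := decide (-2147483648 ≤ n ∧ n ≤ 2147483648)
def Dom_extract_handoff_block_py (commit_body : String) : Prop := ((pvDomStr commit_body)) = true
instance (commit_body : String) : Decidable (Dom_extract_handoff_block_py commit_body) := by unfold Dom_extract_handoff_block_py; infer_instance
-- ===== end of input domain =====

-- B replaces A's stateful flag-and-break loop by a stateless two-phase decomposition
-- (find the header line's index, then filter/take the block lines up to the first terminator).

-- ===== PORT A =====
-- A's for-loop with `in_handoff` flag, accumulator and `break`, line for line
def extractLoopA : List String → Bool → List String → List String
  | [], _, acc => acc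
  | l :: ls, inh, acc =>
    if PySem.Str.startswith l "## Handoff" then extractLoopA ls true acc
    else if inh then
      if PySem.Str.startswith l "## " || PySem.Str.startswith l "---" then acc
      else extractLoopA ls inh (acc ++ [l])
    else extractLoopA ls inh acc

def extract_handoff_block_py (commit_body : String) : Option String :=
  if !(PySem.Str.isIn "## Handoff" commit_body) then none
  else
    let lines := (PySem.Str.split? commit_body "\n").getD []   -- sep ≠ "", so split? is never none
    let handoff_lines := extractLoopA lines false []
    let s := PySem.Str.strip (PySem.Str.join "\n" handoff_lines)
    if s = "" then none else some s

-- ===== PORT B =====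
def extract_handoff_block_py_alt (commit_body : String) : Option String :=
  if !(PySem.Str.isIn "## Handoff" commit_body) then none
  else
    let lines := (PySem.Str.split? commit_body "\n").getD []   -- sep ≠ "", so split? is never none
    match List.findIdx? (fun l => PySem.Str.startswith l "## Handoff") lines with
    | none => none
    | some start =>
      let rest := (lines.drop (start + 1)).filter
        (fun l => !PySem.Str.startswith l "## Handoff")
      let e := (List.findIdx?
        (fun l => PySem.Str.startswith l "## " || PySem.Str.startswith l "---") rest).getD rest.length
      let s := PySem.Str.strip (PySem.Str.join "\n" (rest.take e))
      if s = "" then none else some s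

-- ===== PRECONDITION & SPEC =====
def Spec_extract_handoff_block_py (commit_body : String) (out : Option String) : Prop := out = extract_handoff_block_py_alt commit_body
instance (commit_body : String) (out : Option String) : Decidable (Spec_extract_handoff_block_py commit_body out) := by unfold Spec_extract_handoff_block_py; infer_instance

-- ===== CLAIM (what is proved, stated in full; the proofs are below) =====
def Claim_equal_extract_handoff_block_py : Prop := ∀ (commit_body : String), Dom_extract_handoff_block_py commit_body → Spec_extract_handoff_block_py commit_body (extract_handoff_block_py commit_body)

-- ===== LEMMAS AND PROOFS =====

-- used only by the proofs: B's block-content computation on the lines after the header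
def bBlock (ls : List String) : List String :=
  let rest := ls.filter (fun l => !PySem.Str.startswith l "## Handoff")
  rest.take ((List.findIdx?
    (fun l => PySem.Str.startswith l "## " || PySem.Str.startswith l "---") rest).getD rest.length)

-- once the flag is set, A's loop collects exactly B's block content
theorem extractLoopA_true (ls : List String) : ∀ acc,
    extractLoopA ls true acc = acc ++ bBlock ls := by
  induction ls with
  | nil => intro acc; simp [extractLoopA, bBlock]
  | cons l ls ih =>
    intro acc
    by_cases h : PySem.Str.startswith l "## Handoff" = true
    · simp at h
      simp [extractLoopA, h, ih, bBlock]
    · by_cases he : (PySem.Str.startswith l "## " || PySem.Str.startswith l "---") = true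
      · simp at h
        simp at he
        rcases he with he | he <;>
          simp [extractLoopA, h, he, bBlock, List.findIdx?_cons]
      · simp at h; simp only [Bool.or_eq_true, not_or] at he
        simp at he
        obtain ⟨he1, he2⟩ := he
        simp only [extractLoopA]
        rw [if_neg (by simp [h]), if_pos trivial, if_neg (by simp [he1, he2]), ih]
        simp [bBlock, h, List.findIdx?_cons, he1, he2]

-- before the flag is set, A's loop scans for the first header line
theorem extractLoopA_false (ls : List String) :
    extractLoopA ls false [] =
      match List.findIdx? (fun l => PySem.Str.startswith l "## Handoff") ls with
      | none => []
      | some i => bBlock (ls.drop (i + 1)) := by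
  induction ls with
  | nil => simp [extractLoopA]
  | cons l ls ih =>
    by_cases h : PySem.Str.startswith l "## Handoff" = true
    · simp at h
      simp [extractLoopA, h, List.findIdx?_cons, extractLoopA_true]
    · simp at h
      simp only [extractLoopA, List.findIdx?_cons]
      rw [if_neg (by simp [h])]
      simp only [Bool.false_eq_true, if_false, ih]
      cases hf : List.findIdx? (fun l => PySem.Str.startswith l "## Handoff") ls with
      | none => simp [h]
      | some i => simp [h]

-- ===== VERDICT (by name: the statement is the Claim_ definition above) =====
theorem extract_handoff_block_py_spec : Claim_equal_extract_handoff_block_py := by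
  unfold Claim_equal_extract_handoff_block_py
  intro commit_body _
  unfold Spec_extract_handoff_block_py
  simp only [extract_handoff_block_py, extract_handoff_block_py_alt]
  by_cases hin : PySem.Str.isIn "## Handoff" commit_body = true
  · have h1 : (!PySem.Str.isIn "## Handoff" commit_body) = false := by rw [hin]; rfl
    have h2 : ¬((!PySem.Str.isIn "## Handoff" commit_body) = true) := by
      rw [h1]; exact Bool.false_ne_true
    rw [if_neg h2, if_neg h2, extractLoopA_false]
    cases hf : List.findIdx? (fun l => PySem.Str.startswith l "## Handoff")
        ((PySem.Str.split? commit_body "\n").getD []) with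
    | none =>
      simp [show PySem.Str.strip (PySem.Str.join "\n" ([] : List String)) = "" from by decide]
    | some i => simp [bBlock]
  · simp only [Bool.not_eq_true] at hin
    have h1 : (!PySem.Str.isIn "## Handoff" commit_body) = true := by rw [hin]; rfl
    rw [if_pos h1, if_pos h1]
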